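-- pv_equiv track=rewrite | github.com/minho-git/programmers | 백준/Gold/2493. 탑/탑.py | get_receiver_top_orders
-- ===== SOURCE A (Python) =====
-- def get_receiver_top_orders(heights):
--     stack = []
--     answer = [0] * len(heights)
--
--     for i in range(len(heights) -1, -1, -1):
--
--         while stack and stack[-1][1] < heights[i]:
--             index = stack.pop()[0]
--             answer[index] = i + 1
--
--         stack.append([i, heights[i]])
--
--
--     return answer
-- ===== SOURCE B (Python) =====
-- def get_receiver_top_orders(heights):
--     answer = []
--     for j in range(len(heights)):
--         r = 0
--         for i in range(j - 1, -1, -1):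
--             if heights[i] > heights[j]:
--                 r = i + 1
--                 break
--         answer.append(r)
--     return answer
-- ===== Notes on version B (the rewrite author's own statement) =====
-- stated objective: simpler
-- what changed: Replaces the right-to-left monotonic stack that assigns answers when entries are popped by a direct per-index leftward scan computing each tower's nearest strictly taller left neighbour.
import Mathlib
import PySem

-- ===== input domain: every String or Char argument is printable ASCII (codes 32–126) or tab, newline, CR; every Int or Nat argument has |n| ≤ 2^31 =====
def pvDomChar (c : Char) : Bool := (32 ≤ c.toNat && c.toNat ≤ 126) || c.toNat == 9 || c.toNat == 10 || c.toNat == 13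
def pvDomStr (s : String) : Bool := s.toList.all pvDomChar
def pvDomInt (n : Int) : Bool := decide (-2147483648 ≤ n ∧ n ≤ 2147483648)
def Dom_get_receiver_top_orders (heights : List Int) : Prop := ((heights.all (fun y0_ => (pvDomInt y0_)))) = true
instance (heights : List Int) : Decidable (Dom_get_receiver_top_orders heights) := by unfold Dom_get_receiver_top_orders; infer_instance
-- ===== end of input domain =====

-- B replaces A's right-to-left pop-assigning monotonic stack by a per-index leftward scan; return values agree on all inputs.

-- ===== PORT A =====
-- the inner `while stack and stack[-1][1] < heights[i]` loop: pops entries, writing answer[index] = i+1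
def aPop (h : Int) (i : Nat) : List (Nat × Int) → List Int → List (Nat × Int) × List Int
  | [], ans => ([], ans)
  | (j, hv) :: rest, ans =>
      if hv < h then aPop h i rest (ans.set j ((i : Int) + 1))
      else ((j, hv) :: rest, ans)

-- the outer `for i in range(len(heights)-1, -1, -1)` loop; counter c means index c-1 is processed next
def aMain (hs : List Int) : Nat → List (Nat × Int) → List Int → List Int
  | 0, _, ans => ans
  | c + 1, stack, ans =>
      let h := hs.getD c 0
      let p := aPop h c stack ans
      aMain hs c ((c, h) :: p.1) p.2

def get_receiver_top_orders (heights : List Int) : List Int :=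
  aMain heights heights.length [] (List.replicate heights.length 0)

-- ===== PORT B =====
-- the inner `for i in range(j-1, -1, -1)` scan with break: first i below j with heights[i] > h, as i+1; else 0
def scanLeft (hs : List Int) (h : Int) : Nat → Int
  | 0 => 0
  | i + 1 => if hs.getD i 0 > h then (i : Int) + 1 else scanLeft hs h i

def get_receiver_top_orders_alt (heights : List Int) : List Int :=
  (List.range heights.length).map (fun j => scanLeft heights (heights.getD j 0) j)

-- ===== PRECONDITION & SPEC =====
def Spec_get_receiver_top_orders (heights : List Int) (out : List Int) : Prop := out = get_receiver_top_orders_alt heights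
instance (heights : List Int) (out : List Int) : Decidable (Spec_get_receiver_top_orders heights out) := by unfold Spec_get_receiver_top_orders; infer_instance

-- ===== CLAIM (what is proved, stated in full; the proofs are below) =====
def Claim_equal_get_receiver_top_orders : Prop := ∀ (heights : List Int), Dom_get_receiver_top_orders heights → Spec_get_receiver_top_orders heights (get_receiver_top_orders heights)

-- ===== LEMMAS AND PROOFS =====

-- `nlg hs h lo j`: B's scan restricted to indices ≥ lo (the part of the input A has already processed)
def nlg (hs : List Int) (h : Int) (lo : Nat) : Nat → Int
  | 0 => 0
  | j + 1 => if j < lo then 0 else if hs.getD j 0 > h then (j : Int) + 1 else nlg hs h lo j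

lemma nlg_zero (hs : List Int) (h : Int) : ∀ j, nlg hs h 0 j = scanLeft hs h j := by
  intro j
  induction j with
  | zero => rfl
  | succ j ih => simp [nlg, scanLeft, ih]

lemma nlg_of_le (hs : List Int) (h : Int) {lo j : Nat} (hle : j ≤ lo) : nlg hs h lo j = 0 := by
  cases j with
  | zero => rfl
  | succ j => simp [nlg, Nat.lt_of_succ_le hle]

lemma nlg_hit (hs : List Int) (h : Int) {lo j : Nat}
    (hgt : hs.getD lo 0 > h) (hmid : ∀ k, lo < k → k < j → hs.getD k 0 ≤ h) (hlt : lo < j) :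
    nlg hs h lo j = (lo : Int) + 1 := by
  induction j with
  | zero => omega
  | succ j ih =>
    have h1 : ¬ j < lo := by omega
    simp only [nlg, h1, if_false]
    rcases Nat.lt_or_ge lo j with hj | hj
    · have hle : hs.getD j 0 ≤ h := hmid j hj (Nat.lt_succ_self j)
      split_ifs with hg
      · exact absurd hg (not_lt.mpr hle)
      · exact ih (fun k hk1 hk2 => hmid k hk1 (Nat.lt_succ_of_lt hk2)) hj
    · have hej : j = lo := by omega
      subst hej
      rw [if_pos hgt]

lemma nlg_skip (hs : List Int) (h : Int) {lo : Nat} (hle : hs.getD lo 0 ≤ h) :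
    ∀ j, nlg hs h lo j = nlg hs h (lo + 1) j := by
  intro j
  induction j with
  | zero => rfl
  | succ j ih =>
    simp only [nlg]
    rcases Nat.lt_trichotomy j lo with hj | hj | hj
    · rw [if_pos hj, if_pos (Nat.lt_succ_of_lt hj)]
    · have e1 : ¬ j < lo := by omega
      have e2 : j < lo + 1 := by omega
      have e3 : ¬ hs.getD j 0 > h := by rw [hj]; exact not_lt.mpr hle
      rw [if_neg e1, if_neg e3, if_pos e2, nlg_of_le hs h (by omega : j ≤ lo)]
    · have e1 : ¬ j < lo := by omega
      have e2 : ¬ j < lo + 1 := by omega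
      rw [if_neg e1, if_neg e2, ih]

lemma nlg_stable (hs : List Int) (h : Int) {lo : Nat} :
    ∀ j, (∃ k, lo + 1 ≤ k ∧ k < j ∧ hs.getD k 0 > h) → nlg hs h lo j = nlg hs h (lo + 1) j := by
  intro j
  induction j with
  | zero => rintro ⟨k, _, hk, _⟩; omega
  | succ j ih =>
    rintro ⟨k, hk1, hk2, hk3⟩
    have h1 : ¬ j < lo := by omega
    have h2 : ¬ j < lo + 1 := by omega
    simp only [nlg, h1, h2, if_false]
    split_ifs with hg
    · rfl
    · have hkj : k < j := by
        rcases Nat.lt_or_ge k j with h' | h'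
        · exact h'
        · exfalso
          have : k = j := by omega
          subst this
          exact hg hk3
      exact ih ⟨k, hk1, hkj, hk3⟩

-- "no strictly taller tower between lo (incl.) and j (excl.)"
def Pgt (hs : List Int) (lo j : Nat) : Prop := ∀ k, lo ≤ k → k < j → hs.getD k 0 ≤ hs.getD j 0

-- the stack invariant at counter c
def SInv (hs : List Int) (c : Nat) (s : List (Nat × Int)) : Prop :=
  (∀ p ∈ s, p.2 = hs.getD p.1 0 ∧ c ≤ p.1 ∧ p.1 < hs.length ∧ Pgt hs c p.1) ∧
  (∀ j, c ≤ j → j < hs.length → Pgt hs c j → (j, hs.getD j 0) ∈ s) ∧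
  List.Pairwise (fun a b : Nat × Int => a.2 ≤ b.2) s

-- membership in dropWhile for an element that fails the predicate
lemma mem_dropWhile_of_not {α : Type} (p : α → Bool) {x : α} :
    ∀ {s : List α}, x ∈ s → p x = false → x ∈ s.dropWhile p := by
  intro s
  induction s with
  | nil => intro h _; cases h
  | cons a t ih =>
    intro hmem hpx
    by_cases ha : p a = true
    · rw [List.dropWhile_cons_of_pos ha]
      rcases List.mem_cons.mp hmem with he | hmem'
      · exfalso
        subst he
        rw [hpx] at ha
        cases ha
      · exact ih hmem' hpx
    · rw [List.dropWhile_cons_of_neg ha]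
      exact hmem

-- with pairwise-nondecreasing heights, nothing kept by dropWhile is below h
lemma dropWhile_ge {h : Int} :
    ∀ {s : List (Nat × Int)}, List.Pairwise (fun a b : Nat × Int => a.2 ≤ b.2) s →
    ∀ p ∈ s.dropWhile (fun q => q.2 < h), ¬ p.2 < h := by
  intro s
  induction s with
  | nil => intro _ p hp; cases hp
  | cons a t ih =>
    intro hpw p hp
    rcases List.pairwise_cons.mp hpw with ⟨ha, hpw'⟩
    by_cases hga : a.2 < h
    · rw [List.dropWhile_cons_of_pos (by simpa using hga)] at hp
      exact ih hpw' p hp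
    · rw [List.dropWhile_cons_of_neg (by simpa using hga)] at hp
      rcases List.mem_cons.mp hp with he | hp'
      · subst he; exact hga
      · exact fun hlt => hga (lt_of_le_of_lt (ha p hp') hlt)

-- the pop loop is takeWhile/dropWhile plus a fold of answer updates
lemma aPop_eq (h : Int) (i : Nat) :
    ∀ (s : List (Nat × Int)) (ans : List Int),
      aPop h i s ans =
        (s.dropWhile (fun q => q.2 < h),
         (s.takeWhile (fun q => q.2 < h)).foldl (fun a q => a.set q.1 ((i : Int) + 1)) ans) := by
  intro s
  induction s with
  | nil => intro ans; rfl
  | cons a t ih =>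
    intro ans
    obtain ⟨j, hv⟩ := a
    by_cases hlt : hv < h
    · rw [List.dropWhile_cons_of_pos (by simpa using hlt), List.takeWhile_cons_of_pos (by simpa using hlt)]
      simp only [aPop, if_pos hlt, ih, List.foldl_cons]
    · rw [List.dropWhile_cons_of_neg (by simpa using hlt), List.takeWhile_cons_of_neg (by simpa using hlt)]
      simp only [aPop, if_neg hlt, List.foldl_nil]

lemma foldl_set_length (v : Int) :
    ∀ (l : List (Nat × Int)) (ans : List Int),
      (l.foldl (fun a q => a.set q.1 v) ans).length = ans.length := by
  intro l
  induction l with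
  | nil => intro ans; rfl
  | cons a t ih => intro ans; rw [List.foldl_cons, ih, List.length_set]

lemma foldl_set_getD (v : Int) :
    ∀ (l : List (Nat × Int)) (ans : List Int) (j : Nat), j < ans.length →
      (l.foldl (fun a q => a.set q.1 v) ans).getD j 0 =
        if j ∈ l.map Prod.fst then v else ans.getD j 0 := by
  intro l
  induction l with
  | nil => intro ans j _; simp
  | cons a t ih =>
    intro ans j hj
    rw [List.foldl_cons, ih (ans.set a.1 v) j (by rw [List.length_set]; exact hj)]
    by_cases hmem : j ∈ t.map Prod.fst
    · rw [if_pos hmem, if_pos (by simp [hmem])]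
    · rw [if_neg hmem]
      by_cases hja : j = a.1
      · subst hja
        rw [if_pos (by simp), List.getD_eq_getElem?_getD, List.getElem?_set_self hj]
        rfl
      · rw [if_neg (by simp [hmem, hja]), List.getD_eq_getElem?_getD,
          List.getElem?_set_ne (fun h => hja h.symm), ← List.getD_eq_getElem?_getD]

lemma main_invariant (hs : List Int) :
    ∀ (c : Nat), c ≤ hs.length →
    ∀ (s : List (Nat × Int)) (ans : List Int),
      SInv hs c s → ans.length = hs.length →
      (∀ j, j < hs.length → ans.getD j 0 = nlg hs (hs.getD j 0) c j) →
      (aMain hs c s ans).length = hs.length ∧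
      (∀ j, j < hs.length → (aMain hs c s ans).getD j 0 = nlg hs (hs.getD j 0) 0 j) := by
  intro c
  induction c with
  | zero =>
    intro _ s ans _ hlen hans
    exact ⟨hlen, hans⟩
  | succ c ih =>
    intro hcn s ans hS hlen hans
    obtain ⟨hsound, hcomp, hpw⟩ := hS
    have hcn' : c < hs.length := Nat.lt_of_succ_le hcn
    set h := hs.getD c 0 with hh
    set popped := s.takeWhile (fun q => q.2 < h) with hpop
    set kept := s.dropWhile (fun q => q.2 < h) with hkept
    set ans' := popped.foldl (fun a q => a.set q.1 ((c : Int) + 1)) ans with hans'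
    have hlen' : ans'.length = hs.length := by rw [hans', foldl_set_length, hlen]
    have hkept_mem : ∀ p, p ∈ kept → p ∈ s := by
      intro p hp
      exact (List.dropWhile_sublist _).subset hp
    have hkept_ge : ∀ p, p ∈ kept → ¬ p.2 < h := by
      intro p hp
      exact dropWhile_ge hpw p hp
    have hpop_mem : ∀ p, p ∈ popped → p ∈ s := by
      intro p hp
      exact (List.takeWhile_sublist _).subset hp
    have hpop_lt : ∀ p, p ∈ popped → p.2 < h := by
      intro p hp
      simpa using List.mem_takeWhile_imp hp
    have hsplit : ∀ p, p ∈ s → p ∈ popped ∨ p ∈ kept := by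
      intro p hp
      rw [hpop, hkept]
      rw [← List.takeWhile_append_dropWhile (p := fun q : Nat × Int => decide (q.2 < h)) (l := s)] at hp
      simpa using List.mem_append.mp hp
    -- new stack invariant
    have hS' : SInv hs c ((c, h) :: kept) := by
      refine ⟨?_, ?_, ?_⟩
      · intro p hp
        rcases List.mem_cons.mp hp with he | hp'
        · subst he
          exact ⟨rfl, Nat.le_refl c, hcn', fun k hk1 hk2 => by omega⟩
        · obtain ⟨h1, h2, h3, h4⟩ := hsound p (hkept_mem p hp')
          refine ⟨h1, Nat.le_of_succ_le h2, h3, ?_⟩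
          intro k hk1 hk2
          rcases Nat.eq_or_lt_of_le hk1 with hk | hk
          · rw [← hk]
            have := hkept_ge p hp'
            rw [h1] at this
            exact not_lt.mp this
          · exact h4 k hk hk2
      · intro j hj1 hj2 hj3
        rcases Nat.eq_or_lt_of_le hj1 with hj | hj
        · rw [← hj]
          exact List.mem_cons_self
        · refine List.mem_cons_of_mem _ ?_
          have hmem : (j, hs.getD j 0) ∈ s :=
            hcomp j hj hj2 (fun k hk1 hk2 => hj3 k (Nat.le_of_succ_le hk1) hk2)
          have hge : ¬ hs.getD j 0 < h := not_lt.mpr (hj3 c (Nat.le_refl c) hj)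
          exact mem_dropWhile_of_not _ hmem (by simpa using hge)
      · refine List.pairwise_cons.mpr ⟨?_, hpw.sublist (List.dropWhile_sublist _)⟩
        intro p hp
        exact not_lt.mp (hkept_ge p hp)
    -- new answer invariant
    have hans'' : ∀ j, j < hs.length → ans'.getD j 0 = nlg hs (hs.getD j 0) c j := by
      intro j hjn
      rw [hans', foldl_set_getD _ _ _ _ (by rw [hlen]; exact hjn)]
      by_cases hmem : j ∈ popped.map Prod.fst
      · -- j was popped: hs[j] < h, j was on the stack, answer becomes c+1
        rw [if_pos hmem]
        obtain ⟨p, hp, hpj⟩ := List.mem_map.mp hmem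
        obtain ⟨h1, h2, h3, h4⟩ := hsound p (hpop_mem p hp)
        have hjlt : hs.getD j 0 < h := by
          have := hpop_lt p hp
          rw [h1, hpj] at this
          exact this
        have hcj : c < j := by
          rw [← hpj]
          exact Nat.lt_of_succ_le h2
        refine (nlg_hit hs (hs.getD j 0) hjlt ?_ hcj).symm
        intro k hk1 hk2
        have hmid := h4 k hk1 (by omega)
        rw [hpj] at hmid
        exact hmid
      · rw [if_neg hmem, hans j hjn]
        by_cases hjc : j ≤ c
        · rw [nlg_of_le hs _ hjc, nlg_of_le hs _ (Nat.le_succ_of_le hjc)]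
        · have hjc' : c < j := Nat.lt_of_not_le hjc
          by_cases hge : hs.getD c 0 ≤ hs.getD j 0
          · exact (nlg_skip hs _ hge j).symm
          · have hgt : hs.getD j 0 < h := by rw [hh]; exact lt_of_not_ge hge
            by_cases hP : Pgt hs (c + 1) j
            · exfalso
              have hmem' : (j, hs.getD j 0) ∈ s := hcomp j (Nat.succ_le_of_lt hjc') hjn hP
              rcases hsplit _ hmem' with hin | hin
              · exact hmem (List.mem_map.mpr ⟨_, hin, rfl⟩)
              · exact (hkept_ge _ hin) hgt
            · simp only [Pgt, not_forall] at hP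
              obtain ⟨k, hk1, hk2, hk3⟩ := hP
              exact (nlg_stable hs _ j ⟨k, hk1, hk2, lt_of_not_ge hk3⟩).symm
    have hstep : aMain hs (c + 1) s ans = aMain hs c ((c, h) :: kept) ans' := by
      show aMain hs c ((c, h) :: (aPop h c s ans).1) (aPop h c s ans).2 = _
      rw [aPop_eq]
    rw [hstep]
    exact ih (Nat.le_of_succ_le hcn) _ _ hS' hlen' hans''

-- ===== VERDICT (by name: the statement is the Claim_ definition above) =====
theorem get_receiver_top_orders_spec : Claim_equal_get_receiver_top_orders := by
  intro hs _
  unfold Spec_get_receiver_top_orders get_receiver_top_orders get_receiver_top_orders_alt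
  have hinit : SInv hs hs.length [] := by
    refine ⟨fun p hp => absurd hp (List.not_mem_nil), fun j hj1 hj2 _ => by omega, List.Pairwise.nil⟩
  have hans0 : ∀ j, j < hs.length → (List.replicate hs.length (0 : Int)).getD j 0 = nlg hs (hs.getD j 0) hs.length j := by
    intro j hj
    rw [nlg_of_le hs _ (Nat.le_of_lt hj), List.getD_eq_getElem?_getD, List.getElem?_replicate,
      if_pos hj]
    rfl
  obtain ⟨hlen, hval⟩ := main_invariant hs hs.length (Nat.le_refl _) [] _ hinit List.length_replicate hans0
  apply List.ext_getElem
  · rw [hlen, List.length_map, List.length_range]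
  · intro j hj1 hj2
    have hjn : j < hs.length := by rw [hlen] at hj1; exact hj1
    have hv := hval j hjn
    rw [List.getD_eq_getElem?_getD, List.getElem?_eq_getElem hj1, Option.getD_some] at hv
    rw [hv, nlg_zero]
    simp
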